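-- pv_equiv track=rewrite | github.com/BestOfOpera/best-of-opera-app2 | app-editor/backend/app/services/legendas.py | quebrar_texto_overlay
-- ===== SOURCE A (Python) =====
-- OVERLAY_MAX_CHARS = 70
--
-- def quebrar_texto_overlay(texto: str, max_chars: int = OVERLAY_MAX_CHARS) -> str:
--     """Quebra texto em 2 linhas equilibradas se exceder max_chars.
--     Encontra o ponto de quebra mais próximo do meio, sem cortar palavras.
--     Usa \\N (line break do ASS) para separar."""
--     if len(texto) <= max_chars:
--         return texto
--     palavras = texto.split()
--     if len(palavras) <= 1:
--         return texto
--     # Encontrar o ponto de quebra que deixa as 2 linhas mais equilibradas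
--     meio = len(texto) / 2
--     melhor_quebra = 0
--     melhor_diff = len(texto)
--     pos = 0
--     for i, palavra in enumerate(palavras[:-1]):
--         pos += len(palavra) + (1 if i > 0 else 0)
--         diff = abs(pos - meio)
--         if diff < melhor_diff:
--             melhor_diff = diff
--             melhor_quebra = i + 1
--     linha1 = " ".join(palavras[:melhor_quebra])
--     linha2 = " ".join(palavras[melhor_quebra:])
--     return linha1 + "\\N" + linha2
-- ===== SOURCE B (Python) =====
-- OVERLAY_MAX_CHARS = 70
--
-- def quebrar_texto_overlay(texto: str, max_chars: int = OVERLAY_MAX_CHARS) -> str: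
--     """Breaks text into 2 balanced lines if longer than max_chars, never
--     splitting a word; \\N is the ASS line break."""
--     if len(texto) <= max_chars:
--         return texto
--     palavras = texto.split()
--     if len(palavras) <= 1:
--         return texto
--     L = len(texto)
--     # Line-1 lengths grow strictly with the break point, so the imbalance
--     # |2*pos - L| is unimodal: walk only until the first break at or after
--     # the middle, then pick between that break and the one just before it
--     # (earlier wins ties, matching the original's earliest-wins rule).
--     pos = len(palavras[0])
--     prev = pos
--     b = 1
--     for p in palavras[1:-1]:
--         if 2 * pos >= L:
--             break
--         prev = pos
--         b += 1
--         pos += 1 + len(p)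
--     if b > 1 and 2 * pos >= L and L - 2 * prev <= 2 * pos - L:
--         b -= 1
--     return " ".join(palavras[:b]) + "\\N" + " ".join(palavras[b:])
-- ===== Notes on version B (the rewrite author's own statement) =====
-- stated objective: alternative
-- what changed: Instead of scanning every break point while tracking the running best diff, B exploits that line-1 length strictly increases (so the imbalance is unimodal): it walks only until the first break at/after the text's middle, then chooses between that break and the one just before it, with the earlier break winning ties as in A.
import Mathlib
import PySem

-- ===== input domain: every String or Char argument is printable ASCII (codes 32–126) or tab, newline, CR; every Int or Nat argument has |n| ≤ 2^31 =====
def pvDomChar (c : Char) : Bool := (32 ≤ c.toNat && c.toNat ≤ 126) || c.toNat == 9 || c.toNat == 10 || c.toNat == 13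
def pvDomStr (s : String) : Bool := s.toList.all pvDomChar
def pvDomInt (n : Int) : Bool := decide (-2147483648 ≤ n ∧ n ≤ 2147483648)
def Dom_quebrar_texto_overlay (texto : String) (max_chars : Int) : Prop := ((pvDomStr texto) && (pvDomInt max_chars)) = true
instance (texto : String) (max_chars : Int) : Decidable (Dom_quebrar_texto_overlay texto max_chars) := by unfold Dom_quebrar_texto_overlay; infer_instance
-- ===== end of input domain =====

-- B replaces A's scan of every break point with a tracked running best by an
-- early-exit walk to the first break at/after the middle (the imbalance is
-- unimodal since line-1 length strictly increases), comparing two candidates.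

-- ===== PORT A =====
-- Python's meio = len(texto)/2 and abs(pos - meio) are exact in float here; the port
-- tracks the DOUBLED integers instead: diff < melhor_diff ⟺ |2*pos - L| < melhor_diff2,
-- with melhor_diff2 starting at 2*L (= doubled initial melhor_diff = len(texto)).
def quebrar_texto_overlay (texto : String) (max_chars : Int) : String :=
  if PySem.Str.len texto ≤ max_chars then texto
  else
    let palavras := PySem.Str.split₀ texto
    if (palavras.length : Int) ≤ 1 then texto
    else
      let L : Int := PySem.Str.len texto
      -- state (melhor_quebra, melhor_diff2, pos); loop over enumerate(palavras[:-1])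
      let st := (PySem.List.enumerate (PySem.List.slice palavras none (some (-1)))).foldl
        (fun (s : Int × Int × Int) ip =>
          let pos := s.2.2 + PySem.Str.len ip.2 + (if ip.1 > 0 then 1 else 0)
          let diff2 := |2 * pos - L|
          if diff2 < s.2.1 then (ip.1 + 1, diff2, pos) else (s.1, s.2.1, pos))
        (0, 2 * L, 0)
      let linha1 := PySem.Str.join " " (PySem.List.slice palavras none (some st.1))
      let linha2 := PySem.Str.join " " (PySem.List.slice palavras (some st.1) none)
      linha1 ++ "\\N" ++ linha2

-- ===== PORT B =====
-- the for-loop with break over palavras[1:-1]: state (b, pos, prev)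
def pvWalkB (L : Int) : List String → Int → Int → Int → Int × Int × Int
  | [], b, pos, prev => (b, pos, prev)
  | p :: resto, b, pos, prev =>
      if L ≤ 2 * pos then (b, pos, prev)
      else pvWalkB L resto (b + 1) (pos + 1 + PySem.Str.len p) pos

def quebrar_texto_overlay_alt (texto : String) (max_chars : Int) : String :=
  if PySem.Str.len texto ≤ max_chars then texto
  else
    let palavras := PySem.Str.split₀ texto
    if (palavras.length : Int) ≤ 1 then texto
    else
      let L : Int := PySem.Str.len texto
      -- palavras[0] is in range here (≥ 2 words), so pyGetD's default is unreachable
      let pos0 := PySem.Str.len (PySem.List.pyGetD palavras 0 "")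
      let s := pvWalkB L (PySem.List.slice palavras (some 1) (some (-1))) 1 pos0 pos0
      let b := if s.1 > 1 ∧ L ≤ 2 * s.2.1 ∧ L - 2 * s.2.2 ≤ 2 * s.2.1 - L then s.1 - 1 else s.1
      PySem.Str.join " " (PySem.List.slice palavras none (some b)) ++ "\\N" ++
        PySem.Str.join " " (PySem.List.slice palavras (some b) none)

-- ===== PRECONDITION & SPEC =====
def Spec_quebrar_texto_overlay (texto : String) (max_chars : Int) (out : String) : Prop := out = quebrar_texto_overlay_alt texto max_chars
instance (texto : String) (max_chars : Int) (out : String) : Decidable (Spec_quebrar_texto_overlay texto max_chars out) := by unfold Spec_quebrar_texto_overlay; infer_instance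

-- ===== CLAIM (what is proved, stated in full; the proofs are below) =====
def Claim_equal_quebrar_texto_overlay : Prop := ∀ (texto : String) (max_chars : Int), Dom_quebrar_texto_overlay texto max_chars → Spec_quebrar_texto_overlay texto max_chars (quebrar_texto_overlay texto max_chars)

-- ===== LEMMAS AND PROOFS =====

-- first-minimum step on (index, key) pairs
def pvStep (s : Int × Int) (kd : Int × Int) : Int × Int := if kd.2 < s.2 then kd else s

-- the (index, key) candidates A generates from position p at enumerate index i
def pvPairs (L i p : Int) : List String → List (Int × Int)
  | [] => []
  | w :: t => (i + 1, |2 * (p + PySem.Str.len w + 1) - L|) ::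
      pvPairs L (i + 1) (p + PySem.Str.len w + 1) t

-- B's post-loop adjustment on the loop state (b, pos, prev)
def pvFinish (L : Int) (s : Int × Int × Int) : Int :=
  if s.1 > 1 ∧ L ≤ 2 * s.2.1 ∧ L - 2 * s.2.2 ≤ 2 * s.2.1 - L then s.1 - 1 else s.1

theorem pvFinish_mk (L b pos prev : Int) : pvFinish L (b, pos, prev)
    = if b > 1 ∧ L ≤ 2 * pos ∧ L - 2 * prev ≤ 2 * pos - L then b - 1 else b := rfl

-- A's loop (over enumerate indices ≥ 1) is the first-minimum fold over pvPairs
theorem pvAfold (L : Int) (t : List String) (i b d p : Int) (hi : 1 ≤ i) :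
    (PySem.List.enumerate t i).foldl
      (fun (s : Int × Int × Int) ip =>
        if |2 * (s.2.2 + PySem.Str.len ip.2 + (if ip.1 > 0 then 1 else 0)) - L| < s.2.1 then
          (ip.1 + 1, |2 * (s.2.2 + PySem.Str.len ip.2 + (if ip.1 > 0 then 1 else 0)) - L|,
            s.2.2 + PySem.Str.len ip.2 + (if ip.1 > 0 then 1 else 0))
        else (s.1, s.2.1, s.2.2 + PySem.Str.len ip.2 + (if ip.1 > 0 then 1 else 0)))
      (b, d, p)
    = (((pvPairs L i p t).foldl pvStep (b, d)).1, ((pvPairs L i p t).foldl pvStep (b, d)).2,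
       p + ((t.map (fun w => PySem.Str.len w + 1)).sum)) := by
  induction t generalizing i b d p with
  | nil => simp [PySem.List.enumerate, pvPairs]
  | cons w t ih =>
    rw [PySem.List.enumerate_cons]
    simp only [List.foldl_cons, pvPairs]
    rw [if_pos (by omega : i > 0)]
    have hstep : (if |2 * (p + PySem.Str.len w + 1) - L| < d then
        (i + 1, |2 * (p + PySem.Str.len w + 1) - L|, p + PySem.Str.len w + 1)
        else (b, d, p + PySem.Str.len w + 1))
        = ((pvStep (b, d) (i + 1, |2 * (p + PySem.Str.len w + 1) - L|)).1,
           (pvStep (b, d) (i + 1, |2 * (p + PySem.Str.len w + 1) - L|)).2,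
           p + PySem.Str.len w + 1) := by
      unfold pvStep; split <;> rfl
    rw [hstep, ih _ _ _ _ (by omega)]
    simp only [List.map_cons, List.sum_cons, Prod.mk.injEq, true_and]
    ring

-- once the position has reached the middle with the best diff at most 2p-L,
-- no later candidate can beat it (positions strictly increase)
theorem pvKeep (L : Int) (t : List String) : ∀ (i p b d : Int), L ≤ 2 * p → d ≤ 2 * p - L →
    (pvPairs L i p t).foldl pvStep (b, d) = (b, d) := by
  induction t with
  | nil => intro i p b d _ _; rfl
  | cons w t ih =>
    intro i p b d hL hd
    have hw : 0 ≤ PySem.Str.len w := by rw [PySem.Str.len_eq]; positivity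
    have habs : |2 * (p + PySem.Str.len w + 1) - L| = 2 * (p + PySem.Str.len w + 1) - L := by
      rw [abs_of_nonneg]; omega
    simp only [pvPairs, List.foldl_cons]
    rw [show pvStep (b, d) (i + 1, |2 * (p + PySem.Str.len w + 1) - L|) = (b, d) by
      unfold pvStep; rw [if_neg]; rw [habs]; omega]
    exact ih _ _ _ _ (by omega) (by omega)

theorem pvWalk_stop (L : Int) (t : List String) (b pos prev : Int) (h : L ≤ 2 * pos) :
    pvWalkB L t b pos prev = (b, pos, prev) := by
  cases t with
  | nil => rfl
  | cons w t => simp only [pvWalkB, if_pos h]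

-- main correspondence: before the middle is reached, A's first-minimum fold
-- picks exactly the break B's walk-and-adjust picks
theorem pvM (L : Int) (t : List String) : ∀ (i p prev : Int), 1 ≤ i → 2 * p < L →
    ((pvPairs L i p t).foldl pvStep (i, L - 2 * p)).1 = pvFinish L (pvWalkB L t i p prev) := by
  induction t with
  | nil =>
    intro i p prev hi hp
    show i = pvFinish L (i, p, prev)
    rw [pvFinish_mk]
    split_ifs with h
    · omega
    · rfl
  | cons w t ih =>
    intro i p prev hi hp
    have hw : 0 ≤ PySem.Str.len w := by rw [PySem.Str.len_eq]; positivity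
    have hwalk : pvWalkB L (w :: t) i p prev
        = pvWalkB L t (i + 1) (p + PySem.Str.len w + 1) p := by
      simp only [pvWalkB, if_neg (by omega : ¬ L ≤ 2 * p)]
      rw [show p + 1 + PySem.Str.len w = p + PySem.Str.len w + 1 by ring]
    rw [hwalk]
    simp only [pvPairs, List.foldl_cons]
    by_cases h2 : 2 * (p + PySem.Str.len w + 1) < L
    · -- still before the middle: the new candidate strictly improves; recurse
      have habs : |2 * (p + PySem.Str.len w + 1) - L| = L - 2 * (p + PySem.Str.len w + 1) := by
        rw [abs_of_neg (by omega)]; ring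
      rw [show pvStep (i, L - 2 * p) (i + 1, |2 * (p + PySem.Str.len w + 1) - L|)
          = (i + 1, L - 2 * (p + PySem.Str.len w + 1)) by
        unfold pvStep; rw [habs, if_pos (by omega)]]
      exact ih _ _ p (by omega) h2
    · -- crossed the middle: decide between the two candidates and freeze
      have habs : |2 * (p + PySem.Str.len w + 1) - L| = 2 * (p + PySem.Str.len w + 1) - L := by
        rw [abs_of_nonneg (by omega)]
      rw [pvWalk_stop L t _ _ _ (by omega), pvFinish_mk]
      by_cases h3 : 2 * (p + PySem.Str.len w + 1) - L < L - 2 * p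
      · rw [show pvStep (i, L - 2 * p) (i + 1, |2 * (p + PySem.Str.len w + 1) - L|)
            = (i + 1, 2 * (p + PySem.Str.len w + 1) - L) by
          unfold pvStep; rw [habs, if_pos h3]]
        rw [pvKeep L t _ _ _ _ (by omega) (by omega)]
        split_ifs with h
        · omega
        · rfl
      · rw [show pvStep (i, L - 2 * p) (i + 1, |2 * (p + PySem.Str.len w + 1) - L|)
            = (i, L - 2 * p) by unfold pvStep; rw [habs, if_neg h3]]
        rw [pvKeep L t _ _ _ _ (by omega) (by omega)]
        split_ifs with h
        · omega
        · omega

-- every word str.split()'s worker emits is nonempty and no longer than its input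
theorem pvSplitGoBound (s : List Char) : ∀ (cur : List Char) (acc : List (List Char)),
    ∀ w ∈ PySem.Chars.split₀.go s cur acc,
      (w ≠ [] ∧ w.length ≤ cur.length + s.length) ∨ w ∈ acc := by
  induction s with
  | nil =>
    intro cur acc w hw
    have hgo : PySem.Chars.split₀.go [] cur acc =
        (if cur.isEmpty = true then acc.reverse else (cur.reverse :: acc).reverse) := rfl
    rw [hgo] at hw
    split_ifs at hw with hc
    · exact Or.inr (List.mem_reverse.mp hw)
    · rcases List.mem_cons.mp (List.mem_reverse.mp hw) with hww | hww
      · subst hww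
        refine Or.inl ⟨?_, by simp⟩
        simp only [List.isEmpty_iff] at hc
        simpa using hc
      · exact Or.inr hww
  | cons c rest ih =>
    intro cur acc w hw
    have hgo : PySem.Chars.split₀.go (c :: rest) cur acc =
        (if PySem.Chars.isspace c = true then
          (if cur.isEmpty = true then PySem.Chars.split₀.go rest [] acc
           else PySem.Chars.split₀.go rest [] (cur.reverse :: acc))
         else PySem.Chars.split₀.go rest (c :: cur) acc) := rfl
    rw [hgo] at hw
    split_ifs at hw with hsp hce
    · rcases ih [] acc w hw with ⟨hne, hlen⟩ | hmem
      · exact Or.inl ⟨hne, by simp at hlen ⊢; omega⟩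
      · exact Or.inr hmem
    · rcases ih [] (cur.reverse :: acc) w hw with ⟨hne, hlen⟩ | hmem
      · exact Or.inl ⟨hne, by simp at hlen ⊢; omega⟩
      · rcases List.mem_cons.mp hmem with hww | hww
        · subst hww
          refine Or.inl ⟨?_, by simp⟩
          simp only [List.isEmpty_iff] at hce
          simpa using hce
        · exact Or.inr hww
    · rcases ih (c :: cur) acc w hw with ⟨hne, hlen⟩ | hmem
      · exact Or.inl ⟨hne, by simp at hlen ⊢; omega⟩
      · exact Or.inr hmem

theorem pvFirstWordBound (texto : String) (w0 : String) (tl : List String)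
    (h : PySem.Str.split₀ texto = w0 :: tl) :
    1 ≤ PySem.Str.len w0 ∧ PySem.Str.len w0 ≤ PySem.Str.len texto := by
  simp only [PySem.Str.split₀] at h
  rcases List.map_eq_cons_iff.mp h with ⟨c0, ct, hsp, hw0, -⟩
  have hmem : c0 ∈ PySem.Chars.split₀ texto.toList := by rw [hsp]; exact List.mem_cons_self
  simp only [PySem.Chars.split₀] at hmem
  rcases pvSplitGoBound texto.toList [] [] c0 hmem with ⟨hne, hlen⟩ | hmem'
  · have hlw : PySem.Str.len w0 = (c0.length : Int) := by
      rw [PySem.Str.len_eq, ← hw0, String.toList_ofList]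
    have h0 : 0 < c0.length := List.length_pos_iff.mpr hne
    rw [hlw, PySem.Str.len_eq]
    simp only [List.length_nil, Nat.zero_add] at hlen
    omega
  · simp at hmem'

theorem pvSliceNegOne (xs : List String) : PySem.List.slice xs none (some (-1)) = xs.dropLast := by
  simp [PySem.List.slice, List.dropLast_eq_take]

theorem pvSliceMid (x : String) (xs : List String) :
    PySem.List.slice (x :: xs) (some 1) (some (-1)) = xs.dropLast := by
  simp [PySem.List.slice, List.dropLast_eq_take]

-- ===== VERDICT (by name: the statement is the Claim_ definition above) =====
theorem quebrar_texto_overlay_spec : Claim_equal_quebrar_texto_overlay := by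
  unfold Claim_equal_quebrar_texto_overlay
  intro texto max_chars _
  unfold Spec_quebrar_texto_overlay quebrar_texto_overlay quebrar_texto_overlay_alt
  by_cases h1 : PySem.Str.len texto ≤ max_chars
  · rw [if_pos h1, if_pos h1]
  · rw [if_neg h1, if_neg h1]
    by_cases h2 : ((PySem.Str.split₀ texto).length : Int) ≤ 1
    · simp only [if_pos h2]
    · simp only [if_neg h2]
      obtain ⟨w0, tl, hsp⟩ : ∃ w0 tl, PySem.Str.split₀ texto = w0 :: tl := by
        cases hws : PySem.Str.split₀ texto with
        | nil => rw [hws] at h2; simp at h2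
        | cons a b => exact ⟨a, b, rfl⟩
      obtain ⟨w1, u, htl⟩ : ∃ w1 u, tl = w1 :: u := by
        cases htl : tl with
        | nil => rw [htl] at hsp; rw [hsp] at h2; simp at h2
        | cons a b => exact ⟨a, b, rfl⟩
      subst htl
      rw [hsp, pvSliceNegOne, pvSliceMid]
      rw [show (w0 :: w1 :: u).dropLast = w0 :: (w1 :: u).dropLast from rfl]
      simp only [PySem.List.enumerate_cons, List.foldl_cons, PySem.List.pyGetD_zero_cons]
      obtain ⟨hw1, hwL⟩ := pvFirstWordBound texto w0 (w1 :: u) hsp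
      set L := PySem.Str.len texto with hLdef
      have hL1 : 1 ≤ L := le_trans hw1 hwL
      have hd1 : |2 * PySem.Str.len w0 - L| < 2 * L := by
        rcases abs_cases (2 * PySem.Str.len w0 - L) with ⟨he, -⟩ | ⟨he, -⟩ <;> omega
      have hz : (0 + PySem.Str.len w0 + if (0 : Int) > 0 then 1 else 0) = PySem.Str.len w0 := by
        norm_num
      rw [hz, if_pos hd1, show (0 : Int) + 1 = 1 from by norm_num]
      rw [pvAfold L ((w1 :: u).dropLast) 1 1 (|2 * PySem.Str.len w0 - L|) (PySem.Str.len w0) le_rfl]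
      -- it remains to show the two chosen break indices coincide
      have hb : ((pvPairs L 1 (PySem.Str.len w0) ((w1 :: u).dropLast)).foldl pvStep
            (1, |2 * PySem.Str.len w0 - L|)).1
          = (let s := pvWalkB L ((w1 :: u).dropLast) 1 (PySem.Str.len w0) (PySem.Str.len w0);
             if s.1 > 1 ∧ L ≤ 2 * s.2.1 ∧ L - 2 * s.2.2 ≤ 2 * s.2.1 - L then s.1 - 1 else s.1) := by
        show _ = pvFinish L (pvWalkB L ((w1 :: u).dropLast) 1 (PySem.Str.len w0) (PySem.Str.len w0))
        by_cases hc : L ≤ 2 * PySem.Str.len w0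
        · rw [abs_of_nonneg (by omega), pvKeep L _ _ _ _ _ hc le_rfl,
            pvWalk_stop L _ _ _ _ hc, pvFinish_mk]
          split_ifs with h
          · omega
          · rfl
        · rw [abs_of_neg (by omega), show -(2 * PySem.Str.len w0 - L) = L - 2 * PySem.Str.len w0 by ring]
          exact pvM L _ 1 _ _ le_rfl (by omega)
      rw [hb]
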